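-- pv_equiv track=rewrite | github.com/Nathan-Hall/Tick-Bars | Bar_type.py | split_hours
-- ===== SOURCE A (Python) =====
-- import math
--
-- def split_hours(start, end):
--     b = lambda x: x*60*1000 #to milliseconds
--
--     #50min to ms (binance start end must be less than an hour)
--     fifty_ms = b(55)
--     call_no = int(math.ceil((end - start)/fifty_ms))
--     split = []
--     done=False
--     while done==False:
--         if start + fifty_ms < end:
--             split.append([start, start+fifty_ms])
--             start += fifty_ms
--         else:
--             split.append([start, end])
--             done=True
--
--     return split, call_no
-- ===== SOURCE B (Python) =====
-- import math
--
-- def split_hours(start, end):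
--     fifty_ms = 55 * 60 * 1000
--     call_no = int(math.ceil((end - start) / fifty_ms))
--     n = max(call_no, 1)
--     split = [[start + i * fifty_ms, min(start + (i + 1) * fifty_ms, end)]
--              for i in range(n)]
--     return split, call_no
-- ===== Notes on version B (the rewrite author's own statement) =====
-- stated objective: simpler
-- what changed: Replaces the mutating while-loop with a done flag by computing the chunk count up front (max(call_no,1)) and building every chunk by index arithmetic in one range comprehension, clamping the last boundary with min.
import Mathlib
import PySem

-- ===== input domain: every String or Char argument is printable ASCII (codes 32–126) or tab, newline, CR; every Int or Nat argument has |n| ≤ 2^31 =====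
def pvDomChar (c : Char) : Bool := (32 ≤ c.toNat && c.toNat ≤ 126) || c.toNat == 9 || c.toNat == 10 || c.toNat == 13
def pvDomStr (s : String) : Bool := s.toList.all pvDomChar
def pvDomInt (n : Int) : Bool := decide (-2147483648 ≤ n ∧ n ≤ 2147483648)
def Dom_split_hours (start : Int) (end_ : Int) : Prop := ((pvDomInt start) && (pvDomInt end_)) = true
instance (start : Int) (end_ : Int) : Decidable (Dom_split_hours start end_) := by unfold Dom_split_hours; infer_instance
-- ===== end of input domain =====

-- B replaces A's mutating while-loop (done flag) with a count-first range comprehension; objective: simpler.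

-- ===== PORT A =====
-- int(math.ceil(x / 3300000)): exact as integer ceiling division on the |n| ≤ 2^31 domain
-- (the float quotient's rounding error is far smaller than the 1/3300000 gap to the nearest integer).
def pvCeil55 (a : Int) : Int := -(PySem.Int.floordiv (-a) 3300000)

-- the while-loop of A, with `start` as the mutated state
def pvSplitLoop (start : Int) (end_ : Int) : List (List Int) :=
  if start + 3300000 < end_ then
    [start, start + 3300000] :: pvSplitLoop (start + 3300000) end_
  else
    [[start, end_]]
termination_by (end_ - start).toNat
decreasing_by omega

def split_hours (start : Int) (end_ : Int) : List (List Int) × Int :=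
  (pvSplitLoop start end_, pvCeil55 (end_ - start))

-- ===== PORT B =====
def split_hours_alt (start : Int) (end_ : Int) : List (List Int) × Int :=
  let call_no : Int := -(PySem.Int.floordiv (-(end_ - start)) 3300000)
  let n : Int := max call_no 1
  ((List.range n.toNat).map (fun (i : Nat) =>
      [start + (i : Int) * 3300000, min (start + ((i : Int) + 1) * 3300000) end_]),
   call_no)

-- ===== PRECONDITION & SPEC =====
def Spec_split_hours (start : Int) (end_ : Int) (out : List (List Int) × Int) : Prop := out = split_hours_alt start end_
instance (start : Int) (end_ : Int) (out : List (List Int) × Int) : Decidable (Spec_split_hours start end_ out) := by unfold Spec_split_hours; infer_instance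

-- ===== CLAIM (what is proved, stated in full; the proofs are below) =====
def Claim_equal_split_hours : Prop := ∀ (start : Int) (end_ : Int), Dom_split_hours start end_ → Spec_split_hours start end_ (split_hours start end_)

-- ===== LEMMAS AND PROOFS =====

theorem pvSplitLoop_eq (start end_ : Int) :
    pvSplitLoop start end_ =
      (List.range (max (-(PySem.Int.floordiv (-(end_ - start)) 3300000)) 1).toNat).map (fun (i : Nat) =>
        [start + (i : Int) * 3300000, min (start + ((i : Int) + 1) * 3300000) end_]) := by
  rw [pvSplitLoop]
  rw [PySem.Int.floordiv_eq_ediv_of_pos (a := -(end_ - start)) (b := 3300000) (by norm_num)]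
  by_cases h : start + 3300000 < end_
  · rw [if_pos h, pvSplitLoop_eq (start + 3300000) end_]
    rw [PySem.Int.floordiv_eq_ediv_of_pos (a := -(end_ - (start + 3300000))) (b := 3300000) (by norm_num)]
    have key : (max (-((-(end_ - start)) / 3300000)) 1).toNat
        = (max (-((-(end_ - (start + 3300000))) / 3300000)) 1).toNat + 1 := by omega
    rw [key, List.range_succ_eq_map, List.map_cons, List.map_map]
    congr 1
    · simp [min_eq_left (le_of_lt h)]
    · apply List.map_congr_left
      intro i _
      simp only [Function.comp_apply]
      push_cast
      ring_nf
  · rw [if_neg h]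
    have hn : (max (-((-(end_ - start)) / 3300000)) 1).toNat = 1 := by omega
    rw [hn]
    simp [min_eq_right (by omega : end_ ≤ start + 3300000)]
termination_by (end_ - start).toNat
decreasing_by omega

theorem split_hours_spec : Claim_equal_split_hours := by
  intro start end_ _
  unfold Spec_split_hours split_hours split_hours_alt pvCeil55
  simp only []
  exact congrArg (fun l => (l, _)) (pvSplitLoop_eq start end_)

-- ===== VERDICT (by name: the statement is the Claim_ definition above) =====
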